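-- pv_equiv track=rewrite | github.com/pmaddi/euler | problem_103.py | valid_range
-- ===== SOURCE A (Python) =====
-- def valid_range(parents):
--     upper = min(parents)
--     maxdffs = None
--     for sp in range(len(parents) // 2):
--         la = parents[:(sp + 1)]
--         ra = parents[(-1 * (sp + 1)):]
--         dff = sum(ra) - sum(la)
--         if maxdffs is None or dff > maxdffs:
--             maxdffs = dff
--     if maxdffs is None:
--         maxdffs = 0
--     return range(maxdffs + 1, upper)
-- ===== SOURCE B (Python) =====
-- def valid_range(parents):
--     # One pass with running prefix/suffix sums instead of re-slicing and re-summing.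
--     lo = 0
--     hi = 0
--     best = None
--     for i in range(len(parents) // 2):
--         lo += parents[i]
--         hi += parents[-1 - i]
--         d = hi - lo
--         if best is None or d > best:
--             best = d
--     return range((0 if best is None else best) + 1, min(parents))
-- ===== Notes on version B (the rewrite author's own statement) =====
-- stated objective: faster
-- what changed: Replaces per-iteration list slicing and re-summation of prefix/suffix with running prefix and suffix sums updated by one element per iteration.
import Mathlib
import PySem

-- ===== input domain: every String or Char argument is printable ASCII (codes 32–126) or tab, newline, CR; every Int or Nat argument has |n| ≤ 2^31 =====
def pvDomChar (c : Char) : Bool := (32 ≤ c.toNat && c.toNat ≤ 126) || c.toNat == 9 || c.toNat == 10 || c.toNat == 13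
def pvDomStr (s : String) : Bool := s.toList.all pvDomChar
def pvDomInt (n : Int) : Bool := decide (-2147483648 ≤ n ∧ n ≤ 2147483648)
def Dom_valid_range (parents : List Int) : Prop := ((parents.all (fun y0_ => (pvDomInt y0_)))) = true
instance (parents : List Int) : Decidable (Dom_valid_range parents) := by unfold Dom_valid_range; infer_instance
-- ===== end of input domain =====

-- B replaces A's per-iteration slicing+summing by running prefix/suffix sums (one element per step); proved equal on nonempty lists.

-- ===== PORT A =====
-- loop body of A: la = parents[:sp+1]; ra = parents[-(sp+1):]; dff = sum(ra) - sum(la); max-update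
def vrStepA (parents : List Int) (m : Option Int) (sp : Int) : Option Int :=
  let la := PySem.List.slice parents none (some (sp + 1))
  let ra := PySem.List.slice parents (some (-1 * (sp + 1))) none
  let dff := ra.sum - la.sum
  match m with
  | none => some dff
  | some v => if dff > v then some dff else some v

def valid_range (parents : List Int) : List Int :=
  let upper := (PySem.List.min? parents (fun x => x)).getD 0   -- min(parents); raises on [] (excluded by Pre_)
  -- len(parents)//2 on a nonnegative length is Nat division
  let maxdffs := (PySem.List.pyRange 0 ((parents.length / 2 : Nat) : Int) 1).foldl (vrStepA parents) none
  PySem.List.pyRange (maxdffs.getD 0 + 1) upper 1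

-- ===== PORT B =====
-- loop body of B: lo += parents[i]; hi += parents[-1-i]; d = hi - lo; max-update
def vrStepB (parents : List Int) (s : Int × Int × Option Int) (i : Int) : Int × Int × Option Int :=
  let lo := s.1 + PySem.List.pyGetD parents i 0
  let hi := s.2.1 + PySem.List.pyGetD parents (-1 - i) 0
  let d := hi - lo
  let best := match s.2.2 with
  | none => some d
  | some b => if d > b then some d else some b
  (lo, hi, best)

def valid_range_alt (parents : List Int) : List Int :=
  let s := (PySem.List.pyRange 0 ((parents.length / 2 : Nat) : Int) 1).foldl (vrStepB parents) (0, 0, none)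
  PySem.List.pyRange ((s.2.2.getD 0) + 1) ((PySem.List.min? parents (fun x => x)).getD 0) 1

-- ===== PRECONDITION & SPEC =====
-- Pre_ excludes only the empty list, on which A (and B) raise ValueError from min(parents).
def Pre_valid_range (parents : List Int) : Prop := parents ≠ []
instance (parents : List Int) : Decidable (Pre_valid_range parents) := by unfold Pre_valid_range; infer_instance
def pvWitness_valid_range : List Int := [3, 1, 2]

def Spec_valid_range (parents : List Int) (out : List Int) : Prop := out = valid_range_alt parents
instance (parents : List Int) (out : List Int) : Decidable (Spec_valid_range parents out) := by unfold Spec_valid_range; infer_instance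

-- ===== CLAIM (what is proved, stated in full; the proofs are below) =====
def Claim_equal_valid_range : Prop := ∀ (parents : List Int), Dom_valid_range parents → Pre_valid_range parents → Spec_valid_range parents (valid_range parents)

-- ===== LEMMAS AND PROOFS =====

-- the invariant: after k steps B's state is (prefix-sum k, suffix-sum k, A's accumulator)
theorem vr_inv (parents : List Int) (k : Nat) (hk : 2 * k ≤ parents.length) :
    (PySem.List.pyRange 0 (k : Int) 1).foldl (vrStepB parents) (0, 0, none) =
      ((parents.take k).sum, (parents.drop (parents.length - k)).sum,
       (PySem.List.pyRange 0 (k : Int) 1).foldl (vrStepA parents) none) := by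
  induction k with
  | zero => simp [PySem.List.pyRange_one_eq_nil]
  | succ k ih =>
    have hk' : 2 * k ≤ parents.length := by omega
    have hklt : k < parents.length := by omega
    have hsplit : PySem.List.pyRange 0 ((k + 1 : Nat) : Int) 1
        = PySem.List.pyRange 0 (k : Int) 1 ++ [(k : Int)] := by
      have h1 : ((k + 1 : Nat) : Int) = (k : Int) + 1 := by push_cast; ring
      rw [h1, PySem.List.pyRange_one_succ_right (by omega)]
    rw [hsplit, List.foldl_append, List.foldl_append, ih hk']
    simp only [List.foldl_cons, List.foldl_nil]
    -- evaluate one step of each side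
    have hget : PySem.List.pyGetD parents (k : Int) 0 = parents[k] :=
      PySem.List.pyGetD_ofNat parents k 0 hklt
    have hgetneg : PySem.List.pyGetD parents (-1 - (k : Int)) 0 = parents[parents.length - (k + 1)] := by
      have h2 : (-1 - (k : Int)) = -((k + 1 : Nat) : Int) := by push_cast; ring
      rw [h2, PySem.List.pyGetD_neg_natCast parents (k+1) 0 (by omega) (by omega)]
    have hla : PySem.List.slice parents none (some ((k : Int) + 1)) = parents.take (k + 1) := by
      have h3 : ((k : Int) + 1) = ((k + 1 : Nat) : Int) := by push_cast; ring
      rw [h3, PySem.List.slice_to_natCast]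
    have hra : PySem.List.slice parents (some (-1 * ((k : Int) + 1))) none
        = parents.drop (parents.length - (k + 1)) := by
      have h4 : (-1 * ((k : Int) + 1)) = -((k + 1 : Nat) : Int) := by push_cast; ring
      rw [h4, PySem.List.slice_from_neg_natCast parents (k+1) (by omega)]
    have htake : (parents.take (k + 1)).sum = (parents.take k).sum + parents[k] := by
      rw [List.take_add_one, List.sum_append]
      simp [List.getElem?_eq_getElem hklt]
    have hdrop : (parents.drop (parents.length - (k + 1))).sum
        = (parents.drop (parents.length - k)).sum + parents[parents.length - (k + 1)] := by
      rw [List.drop_eq_getElem_cons (by omega : parents.length - (k + 1) < parents.length)]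
      have h5 : parents.length - (k + 1) + 1 = parents.length - k := by omega
      rw [h5, List.sum_cons]; ring
    simp only [vrStepA, vrStepB, hget, hgetneg, hla, hra]
    refine Prod.ext ?_ (Prod.ext ?_ ?_)
    · simp [htake]
    · simp [hdrop]
    · simp only [htake, hdrop]

-- ===== VERDICT (by name: the statement is the Claim_ definition above) =====
theorem valid_range_spec : Claim_equal_valid_range := by
  intro parents _ _
  unfold Spec_valid_range valid_range valid_range_alt
  have h := vr_inv parents (parents.length / 2) (by omega)
  rw [h]
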